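-- pv_equiv track=rewrite | github.com/ayoubalvasto/fact-checking | medical-factcheck/ml_nlp/pipeline/claim_extractor.py | _extract_main_claim
-- ===== SOURCE A (Python) =====
-- from typing import Dict, List, Tuple
--
-- def _extract_main_claim(text: str, entities: List[str]) -> str:
--     """Extract the main claim from text"""
--     # Strategy: Find sentences with most medical entities
--     sentences = text.split('.')
--
--     best_sentence = ""
--     max_entities = 0
--
--     for sent in sentences:
--         entity_count = sum(1 for ent in entities if ent.lower() in sent.lower())
--         if entity_count > max_entities:
--             max_entities = entity_count
--             best_sentence = sent.strip()
--
--     # If no sentence with entities, use first meaningful sentence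
--     if not best_sentence:
--         best_sentence = sentences[0].strip() if sentences else text
--
--     # Remove duplicates and return
--     return best_sentence[:255] if best_sentence else text[:255]
-- ===== SOURCE B (Python) =====
-- def _extract_main_claim(text, entities):
--     """Extract the main claim from text (entity-densest sentence)."""
--     # Transposed traversal: one lowering pass, then an entity-outer pass filling a
--     # per-sentence count table, then max + first sentence reaching it.
--     sentences = text.split('.')
--     lows = [s.lower() for s in sentences]
--     counts = [0] * len(sentences)
--     for ent in entities:
--         e = ent.lower()
--         for i, ls in enumerate(lows):
--             if e in ls:
--                 counts[i] += 1
--     m = max(counts)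
--     if m > 0:
--         best = next(s for s, c in zip(sentences, counts) if c == m).strip()
--     else:
--         best = ""
--     if not best:
--         best = sentences[0].strip()
--     return best[:255] if best else text[:255]
-- ===== Notes on version B (the rewrite author's own statement) =====
-- stated objective: faster
-- what changed: B replaces A's running-best loop (which re-lowercases the sentence and every entity for each (sentence,entity) comparison) by a transposed two-stage algorithm: lowercase all sentences and each entity exactly once, fill a per-sentence count table in an entity-outer pass, then take the max of the table and return the first sentence whose count reaches it.
import Mathlib
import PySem

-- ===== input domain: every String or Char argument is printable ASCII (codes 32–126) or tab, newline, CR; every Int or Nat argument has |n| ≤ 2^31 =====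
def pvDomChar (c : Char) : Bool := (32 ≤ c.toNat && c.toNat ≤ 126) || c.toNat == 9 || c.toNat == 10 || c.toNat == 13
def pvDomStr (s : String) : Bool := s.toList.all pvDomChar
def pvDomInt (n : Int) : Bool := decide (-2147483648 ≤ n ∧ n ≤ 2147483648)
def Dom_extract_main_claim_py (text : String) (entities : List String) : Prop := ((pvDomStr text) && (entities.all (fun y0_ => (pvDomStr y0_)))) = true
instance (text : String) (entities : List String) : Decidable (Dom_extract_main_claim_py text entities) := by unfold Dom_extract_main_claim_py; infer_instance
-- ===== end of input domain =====

-- B replaces A's running-best loop by a staged, transposed algorithm: lowercase once, fill a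
-- per-sentence entity-count table by an entity-outer pass, then max + first sentence reaching it
-- (objective: faster by a constant factor — each string is lowercased once; same return value everywhere).

-- ===== PORT A =====
-- sum(1 for ent in entities if ent.lower() in sent.lower())
def pvCntA (entities : List String) (sent : String) : Int :=
  entities.foldl (fun acc ent =>
    if PySem.Str.isIn (PySem.Str.lower ent) (PySem.Str.lower sent) then acc + 1 else acc) 0

def extract_main_claim_py (text : String) (entities : List String) : String :=
  let sentences := (PySem.Str.split? text ".").getD []   -- '.' ≠ "": split? is always some here
  let st := sentences.foldl (fun (st : String × Int) sent =>
      let c := pvCntA entities sent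
      if c > st.2 then (PySem.Str.strip sent, c) else st) ("", 0)
  let best := st.1
  let best := if best = "" then (match sentences with
    | [] => text
    | s :: _ => PySem.Str.strip s) else best
  if best ≠ "" then PySem.Str.slice best none (some 255) else PySem.Str.slice text none (some 255)

-- ===== PORT B =====
-- for ent in entities: for i, ls in enumerate(lows): if e in ls: counts[i] += 1
-- (the enumerate/counts[i] update is ported as a conditional +1 over lows zipped with counts)
def extract_main_claim_py_alt (text : String) (entities : List String) : String :=
  let sentences := (PySem.Str.split? text ".").getD []
  let lows := sentences.map PySem.Str.lower
  let counts := entities.foldl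
      (fun cs ent =>
        (lows.zip cs).map (fun q => if PySem.Str.isIn (PySem.Str.lower ent) q.1 then q.2 + 1 else q.2))
      (List.replicate lows.length (0 : Int))
  -- max(counts): counts is nonempty (str.split never returns []), so the getD default is unreachable
  let m := (PySem.List.max? counts (fun y => y)).getD 0
  -- next(s for s, c in zip(sentences, counts) if c == m): m ∈ counts, so the default is unreachable
  let best := if m > 0 then
      PySem.Str.strip (((sentences.zip counts).find? (fun q => q.2 == m)).getD ("", 0)).1
    else ""
  let best := if best = "" then PySem.Str.strip (sentences.headD "") else best
  if best ≠ "" then PySem.Str.slice best none (some 255) else PySem.Str.slice text none (some 255)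

-- ===== PRECONDITION & SPEC =====
def Spec_extract_main_claim_py (text : String) (entities : List String) (out : String) : Prop := out = extract_main_claim_py_alt text entities
instance (text : String) (entities : List String) (out : String) : Decidable (Spec_extract_main_claim_py text entities out) := by unfold Spec_extract_main_claim_py; infer_instance

-- ===== CLAIM (what is proved, stated in full; the proofs are below) =====
def Claim_equal_extract_main_claim_py : Prop := ∀ (text : String) (entities : List String), Dom_extract_main_claim_py text entities → Spec_extract_main_claim_py text entities (extract_main_claim_py text entities)

-- ===== LEMMAS AND PROOFS =====

-- running maximum over pairs, seeded (A's best-tracking loop on (sentence, count) pairs)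
def pvH (p : String × Int) (ps : List (String × Int)) : String × Int :=
  ps.foldl (fun m x => if m.2 < x.2 then x else m) p

theorem pvH_cons (p x : String × Int) (ps : List (String × Int)) :
    pvH p (x :: ps) = pvH (if p.2 < x.2 then x else p) ps := rfl

theorem pvH_eq_or_lt (ps : List (String × Int)) (p : String × Int) :
    pvH p ps = p ∨ p.2 < (pvH p ps).2 := by
  induction ps generalizing p with
  | nil => left; rfl
  | cons x t ih =>
    rw [pvH_cons]
    by_cases h : p.2 < x.2
    · rw [if_pos h]
      rcases ih x with h1 | h1
      · right; rw [h1]; exact h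
      · right; exact lt_trans h h1
    · rw [if_neg h]
      exact ih p

theorem pvH_congr (ps : List (String × Int)) (p p' : String × Int) (h : p.2 = p'.2) :
    pvH p ps = pvH p' ps ∨ (pvH p ps = p ∧ pvH p' ps = p') := by
  induction ps generalizing p p' with
  | nil => right; exact ⟨rfl, rfl⟩
  | cons x t ih =>
    rw [pvH_cons, pvH_cons p']
    by_cases hx : p.2 < x.2
    · left; rw [if_pos hx, if_pos (h ▸ hx)]
    · rw [if_neg hx, if_neg (h ▸ hx)]
      exact ih p p' h

-- the second component of the running maximum is the plain max over the counts
theorem pvH_snd (ps : List (String × Int)) (p : String × Int) :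
    (pvH p ps).2 = ps.foldl (fun a q => max a q.2) p.2 := by
  induction ps generalizing p with
  | nil => rfl
  | cons x t ih =>
    rw [pvH_cons, List.foldl_cons]
    rw [ih]
    congr 1
    split_ifs with h
    · exact (max_eq_right h.le).symm
    · exact (max_eq_left (le_of_not_gt h)).symm

-- first pair whose count equals the running maximum IS the running maximum
theorem pvFind (ps : List (String × Int)) (p : String × Int) :
    (p :: ps).find? (fun q => q.2 == (pvH p ps).2) = some (pvH p ps) := by
  induction ps generalizing p with
  | nil => simp [pvH]
  | cons x t ih =>
    rw [pvH_cons]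
    by_cases h : p.2 < x.2
    · rw [if_pos h]
      have hgt : p.2 < (pvH x t).2 := by
        rcases pvH_eq_or_lt t x with h1 | h1
        · rw [h1]; exact h
        · exact lt_trans h h1
      rw [List.find?_cons_of_neg (by simp; omega)]
      exact ih x
    · rw [if_neg h]
      rcases pvH_eq_or_lt t p with h1 | h1
      · rw [h1]
        exact List.find?_cons_of_pos (by simp)
      · have hx : x.2 < (pvH p t).2 := lt_of_le_of_lt (le_of_not_gt h) h1
        have hA := ih p
        rw [List.find?_cons_of_neg (by simp; omega)] at hA
        rw [List.find?_cons_of_neg (by simp; omega),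
            List.find?_cons_of_neg (by simp; omega)]
        exact hA

-- A's best-tracking fold, characterised by the seeded running maximum pvH
theorem pvFoldA_eq (c : String → Int) (l : List String) (p : String × Int) (b0 : String) :
    l.foldl (fun st s => let cs := c s; if cs > st.2 then (PySem.Str.strip s, cs) else st) (b0, p.2)
      = (if p.2 < (pvH p (l.map (fun s => (s, c s)))).2
          then (PySem.Str.strip (pvH p (l.map (fun s => (s, c s)))).1, (pvH p (l.map (fun s => (s, c s)))).2)
          else (b0, p.2)) := by
  induction l generalizing p b0 with
  | nil => simp [pvH]
  | cons s t ih =>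
    rw [List.foldl_cons, List.map_cons, pvH_cons]
    dsimp only
    by_cases h : p.2 < c s
    · rw [if_pos (show c s > p.2 from h), if_pos h]
      have hIH := ih (s, c s) (PySem.Str.strip s)
      dsimp only at hIH
      rw [hIH]
      have hle : p.2 < (pvH (s, c s) (t.map (fun s => (s, c s)))).2 := by
        rcases pvH_eq_or_lt (t.map (fun s => (s, c s))) (s, c s) with h1 | h1
        · rw [h1]; exact h
        · exact lt_trans h h1
      rw [if_pos hle]
      by_cases h2 : c s < (pvH (s, c s) (t.map (fun s => (s, c s)))).2
      · rw [if_pos h2]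
      · rw [if_neg h2]
        rcases pvH_eq_or_lt (t.map (fun s => (s, c s))) (s, c s) with h1 | h1
        · rw [h1]
        · exact absurd h1 h2
    · rw [if_neg (show ¬ c s > p.2 from h), if_neg h]
      exact ih p b0

theorem pvCntA_nonneg (entities : List String) (s : String) : 0 ≤ pvCntA entities s := by
  unfold pvCntA
  rw [PySem.List.foldl_count_if (fun ent => PySem.Str.isIn (PySem.Str.lower ent) (PySem.Str.lower s)) entities 0]
  positivity

theorem pvCnt_lower (entities : List String) (s : String) :
    ((entities.countP (fun ent => PySem.Str.isIn (PySem.Str.lower ent) (PySem.Str.lower s))) : Int)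
      = pvCntA entities s := by
  unfold pvCntA
  rw [PySem.List.foldl_count_if (fun ent => PySem.Str.isIn (PySem.Str.lower ent) (PySem.Str.lower s)) entities 0]
  rw [zero_add]

-- B's transposed entity-outer fold fills the same per-sentence count table
theorem pvCountsFold (lows : List String) (ents : List String) (f : String → Int) :
    ents.foldl (fun cs ent =>
        (lows.zip cs).map (fun q => if PySem.Str.isIn (PySem.Str.lower ent) q.1 then q.2 + 1 else q.2))
      (lows.map f)
    = lows.map (fun ls => f ls + (ents.countP (fun ent => PySem.Str.isIn (PySem.Str.lower ent) ls) : Int)) := by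
  induction ents generalizing f with
  | nil => simp
  | cons e es ih =>
    rw [List.foldl_cons]
    have hz : (lows.zip (lows.map f)).map (fun q => if PySem.Str.isIn (PySem.Str.lower e) q.1 then q.2 + 1 else q.2)
        = lows.map (fun ls => if PySem.Str.isIn (PySem.Str.lower e) ls then f ls + 1 else f ls) := by
      have h := List.zip_map' (f := id) (g := f) (l := lows)
      simp only [List.map_id] at h
      rw [h, List.map_map]
      rfl
    rw [hz, ih]
    refine List.map_congr_left (fun ls _ => ?_)
    rw [List.countP_cons]
    split_ifs <;> push_cast <;> ring

-- ===== VERDICT (by name: the statement is the Claim_ definition above) =====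
theorem extract_main_claim_py_spec : Claim_equal_extract_main_claim_py := by
  intro text entities _
  simp only [Spec_extract_main_claim_py, extract_main_claim_py, extract_main_claim_py_alt]
  generalize (PySem.Str.split? text ".").getD [] = l
  have hrep : List.replicate (l.map PySem.Str.lower).length (0 : Int)
      = (l.map PySem.Str.lower).map (fun _ => (0 : Int)) := by
    rw [List.map_const', List.length_map]
  have hcounts : entities.foldl
      (fun cs ent =>
        ((l.map PySem.Str.lower).zip cs).map (fun q => if PySem.Str.isIn (PySem.Str.lower ent) q.1 then q.2 + 1 else q.2))
      (List.replicate (l.map PySem.Str.lower).length (0 : Int))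
      = l.map (pvCntA entities) := by
    rw [hrep, pvCountsFold, List.map_map]
    exact List.map_congr_left (fun s _ => by
      simp only [Function.comp_def, zero_add, pvCnt_lower])
  rw [hcounts]
  have hzip : (l.map id).zip (l.map (pvCntA entities))
      = l.map (fun a => (id a, pvCntA entities a)) := List.zip_map'
  simp only [List.map_id, id_eq] at hzip
  rw [hzip]
  cases l with
  | nil =>
    simp only [List.foldl_nil, List.map_nil, PySem.List.max?, Option.getD_none, List.headD_nil]
    norm_num
    have hstrip : PySem.Str.strip "" = "" := rfl
    rw [hstrip]
    norm_num
  | cons x t =>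
    have hA := pvFoldA_eq (pvCntA entities) (x :: t) ("", 0) ""
    dsimp only at hA
    rw [List.map_cons, pvH_cons] at hA
    simp only [List.map_cons, PySem.List.max?_id_cons, Option.getD_some]
    have hM2 : List.foldl max (pvCntA entities x) (t.map (pvCntA entities))
        = (pvH (x, pvCntA entities x) (t.map (fun a => (a, pvCntA entities a)))).2 := by
      rw [pvH_snd, List.foldl_map, List.foldl_map]
    rw [hM2]
    set M := pvH (x, pvCntA entities x) (t.map (fun a => (a, pvCntA entities a))) with hMdef
    by_cases hcx : (0:Int) < pvCntA entities x
    · rw [if_pos (show (("", (0:Int))).2 < (x, pvCntA entities x).2 from hcx)] at hA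
      rw [hA]
      have hMpos : 0 < M.2 := by
        rcases pvH_eq_or_lt (t.map (fun a => (a, pvCntA entities a))) (x, pvCntA entities x) with h1 | h1
        · rw [hMdef, h1]; exact hcx
        · rw [hMdef]; exact lt_trans hcx h1
      rw [if_pos hMpos, if_pos hMpos, hMdef, pvFind, Option.getD_some, ← hMdef]
      rfl
    · have hcx0 : pvCntA entities x = 0 :=
        le_antisymm (not_lt.mp hcx) (pvCntA_nonneg entities x)
      rw [if_neg (show ¬ (("", (0:Int))).2 < (x, pvCntA entities x).2 from hcx)] at hA
      rcases pvH_congr (t.map (fun a => (a, pvCntA entities a))) ("", 0) (x, pvCntA entities x)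
          (by simp [hcx0]) with h1 | h1
      · rw [← hMdef] at h1
        rw [h1] at hA
        rw [hA]
        by_cases hp : 0 < M.2
        · rw [if_pos hp, if_pos hp, hMdef, pvFind, Option.getD_some, ← hMdef]
          rfl
        · rw [if_neg hp, if_neg hp]
          rfl
      · rw [h1.1] at hA
        rw [hA]
        have hM0 : M.2 = 0 := by rw [hMdef, h1.2]; exact hcx0
        rw [hM0]
        norm_num
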